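-- pv_equiv track=rewrite | github.com/blagoyt/22303_fundamentals | zad1.py | matrix_gen
-- ===== SOURCE A (Python) =====
-- def matrix_gen(number):
--     matrix = []
--     counter = 1
--     for row in range(number):
--         matrix.append([])
--         for col in range(number):
--             matrix[row].append(counter)
--             counter += 1
--     return matrix
-- ===== SOURCE B (Python) =====
-- def matrix_gen(number):
--     if number <= 0:
--         return []
--     flat = list(range(1, number * number + 1))
--     return [flat[i * number:(i + 1) * number] for i in range(number)]
-- ===== Notes on version B (the rewrite author's own statement) =====
-- stated objective: alternative
-- what changed: Instead of nested loops threading a running counter, B materialises the flat sequence 1..n*n in one pass and then, in a second staged pass, slices it into consecutive length-n chunks.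
import Mathlib
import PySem

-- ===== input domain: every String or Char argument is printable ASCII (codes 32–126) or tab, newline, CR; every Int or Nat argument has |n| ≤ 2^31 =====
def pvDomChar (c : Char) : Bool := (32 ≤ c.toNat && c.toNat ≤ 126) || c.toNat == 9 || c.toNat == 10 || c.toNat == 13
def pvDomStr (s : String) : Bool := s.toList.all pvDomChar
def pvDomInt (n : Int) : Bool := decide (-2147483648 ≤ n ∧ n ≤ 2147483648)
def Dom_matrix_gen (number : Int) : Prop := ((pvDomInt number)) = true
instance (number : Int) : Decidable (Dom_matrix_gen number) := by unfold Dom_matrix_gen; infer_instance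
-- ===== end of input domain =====

-- B builds the flat sequence 1..n*n in one pass and then slices it into length-n rows (objective: alternative).

-- ===== PORT A =====
-- state: (matrix built so far, counter); inner loop appends counter to the current row
def matrix_gen (number : Int) : List (List Int) :=
  ((PySem.List.pyRange 0 number 1).foldl
    (fun (st : List (List Int) × Int) _row =>
      let inner := (PySem.List.pyRange 0 number 1).foldl
        (fun (st2 : List Int × Int) _col => (st2.1 ++ [st2.2], st2.2 + 1)) ([], st.2)
      (st.1 ++ [inner.1], inner.2))
    ([], 1)).1

-- ===== PORT B =====
def matrix_gen_alt (number : Int) : List (List Int) :=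
  if number ≤ 0 then []
  else
    let flat := PySem.List.pyRange 1 (number * number + 1) 1
    (PySem.List.pyRange 0 number 1).map
      (fun i => PySem.List.slice flat (some (i * number)) (some ((i + 1) * number)))

-- ===== PRECONDITION & SPEC =====
def Spec_matrix_gen (number : Int) (out : List (List Int)) : Prop := out = matrix_gen_alt number
instance (number : Int) (out : List (List Int)) : Decidable (Spec_matrix_gen number out) := by unfold Spec_matrix_gen; infer_instance

-- ===== CLAIM (what is proved, stated in full; the proofs are below) =====
def Claim_equal_matrix_gen : Prop := ∀ (number : Int), Dom_matrix_gen number → Spec_matrix_gen number (matrix_gen number)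

-- ===== LEMMAS AND PROOFS =====

-- the inner loop appends counter, counter+1, … for each element of l
theorem pv_inner (l : List Int) : ∀ (acc : List Int) (c : Int),
    l.foldl (fun (st2 : List Int × Int) _ => (st2.1 ++ [st2.2], st2.2 + 1)) (acc, c)
      = (acc ++ PySem.List.pyRange c (c + l.length) 1, c + l.length) := by
  induction l with
  | nil => intro acc c; simp [PySem.List.pyRange_one_eq_nil]
  | cons x xs ih =>
    intro acc c
    rw [List.foldl_cons, ih (acc ++ [c]) (c + 1)]
    have h1 : c < c + ((xs.length : Int) + 1) := by omega
    simp only [Prod.mk.injEq, List.length_cons]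
    refine ⟨?_, by push_cast; ring⟩
    push_cast
    rw [PySem.List.pyRange_one_cons h1,
      show c + ((xs.length : Int) + 1) = c + 1 + (xs.length : Int) by ring]
    simp

-- the outer loop with the (already-characterised) inner step: row k starts at c + k*N
theorem pv_outer (N : Int) (l : List Int) : ∀ (acc : List (List Int)) (c : Int),
    l.foldl
      (fun (st : List (List Int) × Int) _ =>
        (st.1 ++ [PySem.List.pyRange st.2 (st.2 + N) 1], st.2 + N)) (acc, c)
      = (acc ++ (List.range l.length).map
           (fun k : Nat => PySem.List.pyRange (c + (k : Int) * N) (c + (k : Int) * N + N) 1),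
         c + l.length * N) := by
  induction l with
  | nil => intro acc c; simp
  | cons x xs ih =>
    intro acc c
    rw [List.foldl_cons, ih]
    simp only [Prod.mk.injEq, List.length_cons]
    refine ⟨?_, by push_cast; ring⟩
    rw [List.range_succ_eq_map, List.map_cons, List.map_map]
    simp only [Nat.cast_zero, zero_mul, add_zero, List.append_assoc, List.singleton_append]
    congr 2
    apply List.map_congr_left
    intro k _
    simp only [Function.comp_apply]
    congr 1 <;> push_cast <;> ring

-- a slice of a unit-step range is the corresponding sub-range
theorem pv_slice_pyRange (a b x y : Int) (hx : 0 ≤ x) (hxy : x ≤ y) (hyb : a + y ≤ b) :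
    PySem.List.slice (PySem.List.pyRange a b 1) (some x) (some y)
      = PySem.List.pyRange (a + x) (a + y) 1 := by
  rw [PySem.List.slice_toNat (ha := hx) (hb := by omega)]
  rw [PySem.List.pyRange_one_append a (a + x) b (by omega) (by omega)]
  rw [List.drop_append_of_le_length (by simp [PySem.List.length_pyRange_one])]
  rw [List.drop_of_length_le (by simp [PySem.List.length_pyRange_one]), List.nil_append]
  rw [PySem.List.pyRange_one_append (a + x) (a + y) b (by omega) hyb]
  rw [List.take_append_of_le_length (by simp [PySem.List.length_pyRange_one]; omega)]
  rw [List.take_of_length_le (by simp [PySem.List.length_pyRange_one]; omega)]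

theorem matrix_gen_eq_alt (number : Int) : matrix_gen number = matrix_gen_alt number := by
  by_cases h : 0 < number
  · unfold matrix_gen matrix_gen_alt
    rw [if_neg (by omega)]
    simp only [pv_inner, List.nil_append]
    rw [pv_outer]
    conv_rhs => rw [PySem.List.pyRange_one 0 number]
    rw [List.map_map]
    simp only [PySem.List.length_pyRange_one, Int.sub_zero]
    apply List.map_congr_left
    intro k hk
    simp only [Function.comp_apply, zero_add]
    rw [show ((number.toNat : Int)) = number by omega]
    have hkN : (k : Int) < number := by
      have := List.mem_range.mp hk
      omega
    rw [pv_slice_pyRange 1 (number * number + 1) ((k : Int) * number) (((k : Int) + 1) * number)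
      (by positivity) (by nlinarith) (by nlinarith)]
    congr 1 <;> ring
  · unfold matrix_gen matrix_gen_alt
    rw [if_pos (by omega), PySem.List.pyRange_one_eq_nil (by omega)]
    simp

-- ===== VERDICT (by name: the statement is the Claim_ definition above) =====
theorem matrix_gen_spec : Claim_equal_matrix_gen := by
  intro number _
  unfold Spec_matrix_gen
  exact matrix_gen_eq_alt number
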